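-- pv_equiv track=rewrite | github.com/comrados/insyte-analytics | tests/args_to_json.py | format_aa
-- ===== SOURCE A (Python) =====
-- def format_aa(analysis_args):
--     """
--     Checks and converts to dictionary analysis args argument.
--
--     :param analysis_args: list of key-value pairs [<k1 n1 v11 v12 v13 k2 n2 v21 v22 v23 ... kN nN vN1 vN2 vN3>']
--     :return: dictionary {'k1': [v11, v12, v13], 'k2': [v11, v12, v13], ..., 'kN': [vN1, vN2, vN3]}
--     """
--     output = {}
--
--     if analysis_args is not None:
--         next_count = 0
--         for i in range(len(analysis_args)):
--             if next_count == i: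
--                 key = analysis_args[i]
--                 count = int(analysis_args[i + 1])
--                 temp = analysis_args[i + 2:i + 2 + count]
--                 output[key] = temp
--                 next_count = i + 2 + count
--                 i = next_count - 1
--
--     return output
-- ===== SOURCE B (Python) =====
-- def format_aa(analysis_args):
--     output = {}
--     items = list(analysis_args or ())
--     while len(items) > 1:
--         count = int(items[1])
--         output[items[0]] = items[2:2 + count]
--         items = items[2 + count:]
--     return output
-- ===== Notes on version B (the rewrite author's own statement) =====
-- stated objective: simpler
-- what changed: A scans every index of the original list carrying a next_count sentinel to decide which indices act; B keeps no indices at all: it repeatedly consumes the head record of a shrinking list (key, count, values) and reassigns the remainder slice. Pre_ excludes chains containing a count <= -2: A's silent stop there (sentinel falling behind) and its slice arithmetic are accidents of the sentinel, and B's remainder slicing loops forever (count = -2) or wraps Python-style (count <= -3).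
-- outside the precondition, e.g. on format_aa(['k', '-2']): A returns {'k': []}, B does not finish within the time limit; on format_aa(['x', '0', 'k', '-3', 'a', 'b']): A returns {'x': [], 'k': []}, B returns {'x': [], 'k': ['a']}
import Mathlib
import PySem

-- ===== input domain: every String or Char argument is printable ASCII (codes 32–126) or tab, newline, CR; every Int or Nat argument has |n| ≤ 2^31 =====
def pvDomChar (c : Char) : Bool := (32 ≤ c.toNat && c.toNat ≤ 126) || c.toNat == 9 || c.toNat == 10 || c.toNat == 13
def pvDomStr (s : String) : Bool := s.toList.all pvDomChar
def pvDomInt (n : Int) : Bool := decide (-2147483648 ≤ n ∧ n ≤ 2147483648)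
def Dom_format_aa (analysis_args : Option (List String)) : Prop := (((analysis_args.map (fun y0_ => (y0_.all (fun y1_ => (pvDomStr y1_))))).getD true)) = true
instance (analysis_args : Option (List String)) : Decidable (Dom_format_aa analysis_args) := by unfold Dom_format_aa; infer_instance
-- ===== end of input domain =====

-- B consumes the head record of a shrinking list instead of scanning indices with a sentinel;
-- equivalence of the RETURN value is claimed on Pre_ (chains whose counts are all ≥ -1).

-- ===== PORT A =====
-- loop body of A: state (output dict, next_count); i is the current index of range(len(args)).
-- Where Python raises (IndexError on args[i+1], ValueError in int()) the PySem primitive is none;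
-- those inputs are outside Pre_ and the port leaves the state unchanged there.
def stepA (args : List String) (st : PySem.Dict String (List String) × Int) (i : Nat) :
    PySem.Dict String (List String) × Int :=
  if st.2 == (i : Int) then
    match PySem.List.pyGet? args (i : Int), (PySem.List.pyGet? args ((i : Int) + 1)).bind PySem.Int.ofStr? with
    | some key, some count =>
        let temp := PySem.List.slice args (some ((i : Int) + 2)) (some ((i : Int) + 2 + count))
        (st.1.insert key temp, (i : Int) + 2 + count)
    | _, _ => st
  else st

def format_aa (analysis_args : Option (List String)) : List (String × List String) :=
  match analysis_args with
  | none => (PySem.Dict.empty : PySem.Dict String (List String)).items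
  | some args =>
      ((List.range args.length).foldl (stepA args) (PySem.Dict.empty, 0)).1.items

-- ===== PORT B =====
-- B's while loop over the shrinking list 'items': store the head record, continue on the remainder
-- slice.  The fuel argument only totalises the loop (Python B does not terminate when a count of -2
-- leaves 'items' unchanged; such inputs are outside Pre_); inside Pre_ the fuel is never exhausted.
def formatAaLoop : Nat → List String → PySem.Dict String (List String) → PySem.Dict String (List String)
  | f + 1, k :: c :: rest, output =>
      match PySem.Int.ofStr? c with
      | none => output          -- Python raises ValueError here (outside Pre_)
      | some count =>
          let items := k :: c :: rest
          formatAaLoop f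
            (PySem.List.slice items (some (2 + count)) none)
            (output.insert k (PySem.List.slice items (some 2) (some (2 + count))))
  | _, _, output => output      -- len(items) ≤ 1 (loop exit), or fuel spent (never inside Pre_)

def format_aa_alt (analysis_args : Option (List String)) : List (String × List String) :=
  let items := analysis_args.getD []
  (formatAaLoop items.length items PySem.Dict.empty).items

-- ===== PRECONDITION & SPEC =====
-- Pre_ excludes (a) inputs on which Python A raises (IndexError reading past the end, ValueError on
-- a non-int count string) and (b) chains containing a count ≤ -2: there A stops acting because its
-- sentinel falls behind — an accident of the sentinel arithmetic — while B's remainder slicing loops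
-- forever (count = -2) or wraps around Python-style (count ≤ -3); see claim.json "cites".
-- okChainF walks the key/count chain from the front: at a key position there must be a further
-- element holding a parseable count n ≥ -1; then skip 2+n elements.  Fuel = length of the list.
def okChainF : Nat → List String → Bool
  | _, [] => true
  | 0, _ :: _ => false
  | _ + 1, [_] => false
  | f + 1, k :: c :: rest =>
    match PySem.Int.ofStr? c with
    | none => false
    | some n => decide (-1 ≤ n) && okChainF f ((k :: c :: rest).drop (2 + n).toNat)

def okChain (l : List String) : Bool := okChainF l.length l

def Pre_format_aa (analysis_args : Option (List String)) : Prop :=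
  okChain (analysis_args.getD []) = true
instance (analysis_args : Option (List String)) : Decidable (Pre_format_aa analysis_args) := by
  unfold Pre_format_aa; infer_instance

def pvWitness_format_aa : Option (List String) := some ["k", "2", "a", "b", "m", "0"]

def Spec_format_aa (analysis_args : Option (List String)) (out : List (String × List String)) : Prop := out = format_aa_alt analysis_args
instance (analysis_args : Option (List String)) (out : List (String × List String)) : Decidable (Spec_format_aa analysis_args out) := by unfold Spec_format_aa; infer_instance

-- ===== CLAIM (what is proved, stated in full; the proofs are below) =====
def Claim_equal_format_aa : Prop := ∀ (analysis_args : Option (List String)), Dom_format_aa analysis_args → Pre_format_aa analysis_args → Spec_format_aa analysis_args (format_aa analysis_args)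

-- ===== LEMMAS AND PROOFS =====

-- Skipping forward to the sentinel: folding from j with sentinel c ≥ j equals folding from c.
theorem foldl_stepA_skip (args : List String) :
    ∀ (m j c : Nat) (out : PySem.Dict String (List String)),
      j ≤ c →
      (List.range' j m).foldl (stepA args) (out, (c : Int))
        = (List.range' c (m - (c - j))).foldl (stepA args) (out, (c : Int)) := by
  intro m
  induction m with
  | zero => intro j c out _; simp
  | succ m ih =>
      intro j c out hjc
      rcases Nat.eq_or_lt_of_le hjc with h | h
      · subst h; simp
      · rw [List.range'_succ, List.foldl_cons]
        have hne : (c : Int) ≠ (j : Int) := by intro he; omega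
        have : stepA args (out, (c : Int)) j = (out, (c : Int)) := by simp [stepA, hne]
        rw [this, ih (j + 1) c out (by omega)]
        congr 1
        congr 1
        omega

-- okChainF ignores the fuel once it is at least the list's length.
theorem okChainF_eq_of_le : ∀ (f : Nat) (l : List String) (f' : Nat),
    l.length ≤ f → l.length ≤ f' → okChainF f l = okChainF f' l := by
  intro f
  induction f with
  | zero =>
      intro l f' h1 _
      match l, h1 with
      | [], _ => simp [okChainF]
  | succ g ih =>
      intro l f' h1 h2
      match l with
      | [] => simp [okChainF]
      | [x] =>
          cases f' with
          | zero => simp at h2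
          | succ g' => simp [okChainF]
      | k :: c :: rest =>
          cases f' with
          | zero => simp at h2
          | succ g' =>
              simp only [okChainF]
              cases hof : PySem.Int.ofStr? c with
              | none => simp
              | some n =>
                  by_cases hn : -1 ≤ n
                  · have ht1 : 1 ≤ (2 + n).toNat := by omega
                    simp only [hn, decide_true, Bool.true_and]
                    apply ih
                    · simp only [List.length_drop]
                      simp at h1 ⊢
                      omega
                    · simp only [List.length_drop]
                      simp at h2 ⊢
                      omega
                  · simp [hn]

-- formatAaLoop returns its accumulator on the empty list, whatever the fuel.
theorem formatAaLoop_nil (f : Nat) (out : PySem.Dict String (List String)) :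
    formatAaLoop f [] out = out := by
  cases f <;> rfl

-- one iteration of B's loop on a list with at least two elements and a parseable count
theorem formatAaLoop_cons (f : Nat) (k c : String) (rest : List String)
    (out : PySem.Dict String (List String)) (n : Int) (h : PySem.Int.ofStr? c = some n) :
    formatAaLoop (f + 1) (k :: c :: rest) out
      = formatAaLoop f (PySem.List.slice (k :: c :: rest) (some (2 + n)) none)
          (out.insert k (PySem.List.slice (k :: c :: rest) (some 2) (some (2 + n)))) := by
  simp [formatAaLoop, h]

-- Main invariant: from index i with a well-formed remaining chain, A's fold (sentinel = i)
-- computes exactly B's consume-the-remainder loop on args.drop i.  f is B's fuel.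
theorem main_invariant (args : List String) :
    ∀ (f i : Nat), args.length - i ≤ f → ∀ (out : PySem.Dict String (List String)),
      okChain (args.drop i) = true →
      ((List.range' i (args.length - i)).foldl (stepA args) (out, (i : Int))).1
        = formatAaLoop f (args.drop i) out := by
  intro f
  induction f with
  | zero =>
      intro i hle out _
      have hi : args.length ≤ i := by omega
      rw [List.drop_eq_nil_of_le hi]
      simp [Nat.sub_eq_zero_of_le hi, formatAaLoop]
  | succ m ih =>
      intro i hle out hok
      by_cases hi : i < args.length
      · by_cases hi1 : i + 1 < args.length
        · have hd : args.drop i = args[i] :: args[i+1] :: args.drop (i+2) := by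
            rw [List.drop_eq_getElem_cons hi, List.drop_eq_getElem_cons hi1]
          unfold okChain at hok
          rw [hd] at hok
          simp only [List.length_cons, okChainF] at hok
          cases hof : PySem.Int.ofStr? args[i+1] with
          | none => rw [hof] at hok; simp at hok
          | some n =>
            rw [hof] at hok
            simp only [Bool.and_eq_true, decide_eq_true_eq] at hok
            obtain ⟨hn1, hok⟩ := hok
            have ht1 : 1 ≤ (2 + n).toNat := by omega
            -- A's step at i fires
            have hg1 : PySem.List.pyGet? args (i : Int) = some args[i] := by simp [hi]
            have hg2 : PySem.List.pyGet? args ((i : Int) + 1) = some args[i+1] := by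
              have hcast : ((i : Int) + 1) = (((i + 1 : Nat)) : Int) := by push_cast; ring
              rw [hcast, PySem.List.pyGet?_natCast]; simp [hi1]
            have hrange : args.length - i = (args.length - (i+1)) + 1 := by omega
            -- the next key position
            set t := i + (2 + n).toNat with hT
            have hcast2 : (i : Int) + 2 + n = ((t : Nat) : Int) := by
              simp only [hT]; push_cast; omega
            have hcnt : args.length - (i+1) - (t - (i+1)) = args.length - t := by omega
            have hstep : stepA args (out, (i : Int)) i
                = (out.insert args[i] (PySem.List.slice args (some ((i : Int) + 2)) (some ((t : Nat) : Int))), ((t : Nat) : Int)) := by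
              simp only [stepA, beq_self_eq_true, if_true, hg1, hg2, Option.bind, hof, hcast2]
            rw [hrange, List.range'_succ, List.foldl_cons, hstep]
            rw [foldl_stepA_skip args (args.length - (i+1)) (i+1) t _ (by omega), hcnt]
            -- B side: one iteration of the loop on args.drop i
            rw [hd, formatAaLoop_cons m _ _ _ _ n hof]
            -- the two value slices agree
            have hval : PySem.List.slice (args[i] :: args[i+1] :: args.drop (i+2)) (some 2) (some (2 + n))
                = PySem.List.slice args (some ((i : Int) + 2)) (some ((t : Nat) : Int)) := by
              have e1 : ((i : Int) + 2).toNat = i + 2 := by omega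
              have e2 : (((t : Nat)) : Int).toNat = t := Int.toNat_natCast t
              have e3 : ((2 : Int)).toNat = 2 := rfl
              rw [← hd, PySem.List.slice_toNat args (by omega) (by omega),
                  PySem.List.slice_toNat (args.drop i) (by omega) (by omega),
                  List.drop_drop, e1, e2, e3]
              congr 1
              omega
            -- the remainder slice is args.drop t
            have hrem : PySem.List.slice (args[i] :: args[i+1] :: args.drop (i+2)) (some (2 + n)) none
                = args.drop t := by
              rw [← hd, PySem.List.slice_from (args.drop i) (by omega), List.drop_drop, hT]
            -- the remaining chain is well formed
            have hok' : okChain (args.drop t) = true := by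
              unfold okChain
              have hdt : (args[i] :: args[i+1] :: args.drop (i+2)).drop (2 + n).toNat = args.drop t := by
                rw [← hd, List.drop_drop, hT]
              rw [okChainF_eq_of_le _ _ ((args.drop (i+2)).length + 1) le_rfl (by simp; omega), ← hdt]
              exact hok
            rw [hval, hrem]
            exact ih t (by omega) _ hok'
        · -- exactly one element left: okChain is false, contradiction
          have hd : args.drop i = [args[i]] := by
            rw [List.drop_eq_getElem_cons hi, List.drop_eq_nil_of_le (by omega)]
          rw [hd] at hok
          simp [okChain, okChainF] at hok
      · -- past the end
        have hge : args.length ≤ i := by omega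
        rw [List.drop_eq_nil_of_le hge, formatAaLoop_nil]
        simp [Nat.sub_eq_zero_of_le hge]

-- ===== VERDICT (by name: the statement is the Claim_ definition above) =====
theorem format_aa_spec : Claim_equal_format_aa := by
  intro analysis_args _hdom hpre
  unfold Spec_format_aa
  match analysis_args with
  | none => rfl
  | some args =>
      unfold Pre_format_aa at hpre
      simp only [Option.getD] at hpre
      show ((List.range args.length).foldl (stepA args) (PySem.Dict.empty, 0)).1.items
            = (formatAaLoop args.length args PySem.Dict.empty).items
      congr 1
      have := main_invariant args args.length 0 (by omega) PySem.Dict.empty (by simpa using hpre)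
      simpa [List.range_eq_range'] using this
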